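-- pv_equiv track=rewrite | github.com/edu-luc-cs-leo/comp-170-su-2025-week-04-OmarDiaz578 | wee04.py | shortest_word
-- ===== SOURCE A (Python) =====
-- def shortest_word(words: list[str]) -> str:
--   #returns None if list is invalid
--   result = None
--   if words:
--     #starts the loop on the first word and assumes its the shortest
--     result = words[0]
--     #loops through every word on the list
--     for word in words:
--       # if the current word in the loop is shorter it replaces result
--       if len(word) < len(result):
--         result = word
--   #returns the shortest word or None
--   return result
-- ===== SOURCE B (Python) =====
-- def shortest_word(words: list[str]) -> str:
--     # sort-then-pick: stable sort by length, first element is the first shortest word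
--     if words:
--         return sorted(words, key=len)[0]
--     return None
-- ===== Notes on version B (the rewrite author's own statement) =====
-- stated objective: idiomatic
-- what changed: Replaces the running-minimum scan with a stable sort by length followed by taking the first element; stability preserves A's first-shortest tie-break.
import Mathlib
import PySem

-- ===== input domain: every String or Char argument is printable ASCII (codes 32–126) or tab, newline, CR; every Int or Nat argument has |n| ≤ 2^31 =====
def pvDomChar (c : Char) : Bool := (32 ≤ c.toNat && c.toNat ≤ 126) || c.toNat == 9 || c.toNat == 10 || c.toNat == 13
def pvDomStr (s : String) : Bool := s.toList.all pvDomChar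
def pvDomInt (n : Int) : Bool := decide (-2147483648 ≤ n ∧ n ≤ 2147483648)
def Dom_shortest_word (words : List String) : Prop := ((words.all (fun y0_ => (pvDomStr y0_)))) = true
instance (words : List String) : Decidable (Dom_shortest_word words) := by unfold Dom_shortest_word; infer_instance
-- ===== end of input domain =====

-- B replaces A's running-minimum scan by a stable sort on length and taking the first element (same result; different decomposition).


-- ===== PORT A =====
-- result = None; if words: result = words[0]; for word in words: if len(word) < len(result): result = word
def shortest_word (words : List String) : Option String :=
  match words with
  | [] => none
  | w0 :: _ =>
      some (words.foldl (fun result word =>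
        if PySem.Str.len word < PySem.Str.len result then word else result) w0)

-- ===== PORT B =====
-- if words: return sorted(words, key=len)[0]; return None
def shortest_word_alt (words : List String) : Option String :=
  if words = [] then none
  else PySem.List.pyGet? (PySem.List.sorted words (fun w => PySem.Str.len w) false) 0

-- ===== PRECONDITION & SPEC =====
def Spec_shortest_word (words : List String) (out : Option String) : Prop := out = shortest_word_alt words
instance (words : List String) (out : Option String) : Decidable (Spec_shortest_word words out) := by unfold Spec_shortest_word; infer_instance

-- ===== CLAIM (what is proved, stated in full; the proofs are below) =====
def Claim_equal_shortest_word : Prop := ∀ (words : List String), Dom_shortest_word words → Spec_shortest_word words (shortest_word words)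

-- ===== LEMMAS AND PROOFS =====

-- head of a stable insertion step: inserting x into a nonempty acc keeps the running minimum at the front
lemma head?_insertBy (x a : String) (t : List String) :
    (PySem.List.insertBy (fun p q => decide (PySem.Str.len p < PySem.Str.len q)) x (a :: t)).head? =
      some (if PySem.Str.len x < PySem.Str.len a then x else a) := by
  by_cases h : x.length < a.length <;> simp [PySem.List.insertBy, h]

-- loop invariant: the head of the insertion-sort fold equals A's running-minimum fold
lemma head?_foldl_insertBy (xs : List String) :
    ∀ (a : String) (t : List String),
      (xs.foldl (fun acc x => PySem.List.insertBy (fun p q => decide (PySem.Str.len p < PySem.Str.len q)) x acc) (a :: t)).head? =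
        some (xs.foldl (fun result word => if PySem.Str.len word < PySem.Str.len result then word else result) a) := by
  induction xs with
  | nil => intro a t; simp
  | cons x xs ih =>
      intro a t
      simp only [List.foldl_cons]
      have hins := head?_insertBy x a t
      cases hcase : PySem.List.insertBy (fun p q => decide (PySem.Str.len p < PySem.Str.len q)) x (a :: t) with
      | nil => rw [hcase] at hins; simp at hins
      | cons b u =>
          rw [hcase] at hins
          simp only [List.head?_cons, Option.some.injEq] at hins
          rw [ih b u, hins]

-- ===== VERDICT (by name: the statement is the Claim_ definition above) =====
theorem shortest_word_spec : Claim_equal_shortest_word := by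
  intro words _
  unfold Spec_shortest_word shortest_word shortest_word_alt
  cases words with
  | nil => simp
  | cons w0 rest =>
      simp only [reduceCtorEq, if_false]
      rw [PySem.List.sorted_eq_foldl_insertBy]
      simp only [List.foldl_cons, PySem.List.insertBy]
      have hL := head?_foldl_insertBy rest w0 []
      cases hcase : rest.foldl (fun acc x => PySem.List.insertBy (fun p q => decide (PySem.Str.len p < PySem.Str.len q)) x acc) [w0] with
      | nil => rw [hcase] at hL; simp at hL
      | cons c u =>
          rw [hcase] at hL
          simp only [List.head?_cons, Option.some.injEq] at hL
          rw [hL]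
          simp [PySem.List.pyGet?, PySem.List.pyIdx?]
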